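-- pv_equiv track=rewrite | github.com/PrakNew/Competitive-Programming | codevita1.py | find
-- ===== SOURCE A (Python) =====
-- def find(start,end,main):
--   t=end
--   t1=start
--   l=[]
--   p=[]
--   fin1=[]
--   fin2=[]
--   for x in range(t+1):
--     if x<t1:
--       continue
--     l.append((t1,x))
--     fin1.append(main[t1][x])
--     if x!=t1:
--       p.append((x,t1))
--       fin2.append(main[x][t1])
--   for x in range(t1+1,t+1):
--     l.append((x,t))
--     fin1.append(main[x][t])
--     if x!=t:
--       p.append((t,x))
--       fin2.append(main[t][x])
--   l=l+p[::-1]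
--   fin1+=fin2[::-1]
--   return l,fin1
-- ===== SOURCE B (Python) =====
-- def find(start, end, main):
--     if start > end:
--         return [], []
--     coords = (
--         [(start, x) for x in range(start, end + 1)]
--         + [(x, end) for x in range(start + 1, end + 1)]
--         + [(end, x) for x in range(end - 1, start, -1)]
--         + [(x, start) for x in range(end, start, -1)]
--     )
--     vals = [main[i][j] for (i, j) in coords]
--     return coords, vals
-- ===== Notes on version B (the rewrite author's own statement) =====
-- stated objective: simpler
-- what changed: B builds the perimeter directly as four explicit edges (top, right, bottom reversed, left reversed) with range comprehensions in final clockwise order and maps the matrix lookup over the coordinates, instead of A's two interleaved loops with a skip-continue that grow four parallel lists and splice in a reversed tail.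
-- outside the precondition, e.g. on find(-1, -1, [[], [0]]): A returns ([], []), B returns ([(-1, -1)], [0])
import Mathlib
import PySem

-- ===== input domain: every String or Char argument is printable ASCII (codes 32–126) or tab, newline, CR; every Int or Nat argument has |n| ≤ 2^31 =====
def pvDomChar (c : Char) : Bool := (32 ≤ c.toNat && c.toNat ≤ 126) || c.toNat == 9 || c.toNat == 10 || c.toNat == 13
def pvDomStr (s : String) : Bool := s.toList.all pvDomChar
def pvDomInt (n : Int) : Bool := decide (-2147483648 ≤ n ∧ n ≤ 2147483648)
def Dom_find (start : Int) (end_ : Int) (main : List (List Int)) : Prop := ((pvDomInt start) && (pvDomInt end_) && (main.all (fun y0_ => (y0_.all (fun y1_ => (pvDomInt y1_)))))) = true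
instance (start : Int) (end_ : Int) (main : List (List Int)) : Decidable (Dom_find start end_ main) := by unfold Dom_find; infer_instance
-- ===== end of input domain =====

-- B rebuilds the perimeter as four explicit edges in final clockwise order (simpler decomposition; same cost).
-- ===== PORT A =====
-- main[i][j], totalised with defaults; Pre_find guarantees every access is in range.
def pvCell (main : List (List Int)) (i j : Int) : Int :=
  PySem.List.pyGetD (PySem.List.pyGetD main i []) j 0

-- loop body of A's first 'for x in range(t+1)' (state = (l, p, fin1, fin2))
def pvStep1 (main : List (List Int)) (t1 : Int)
    (st : List (Int × Int) × List (Int × Int) × List Int × List Int) (x : Int) :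
    List (Int × Int) × List (Int × Int) × List Int × List Int :=
  if x < t1 then st
  else
    let l := st.1 ++ [(t1, x)]
    let fin1 := st.2.2.1 ++ [pvCell main t1 x]
    if x ≠ t1 then (l, st.2.1 ++ [(x, t1)], fin1, st.2.2.2 ++ [pvCell main x t1])
    else (l, st.2.1, fin1, st.2.2.2)

-- loop body of A's second 'for x in range(t1+1, t+1)'
def pvStep2 (main : List (List Int)) (t : Int)
    (st : List (Int × Int) × List (Int × Int) × List Int × List Int) (x : Int) :
    List (Int × Int) × List (Int × Int) × List Int × List Int :=
  let l := st.1 ++ [(x, t)]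
  let fin1 := st.2.2.1 ++ [pvCell main x t]
  if x ≠ t then (l, st.2.1 ++ [(t, x)], fin1, st.2.2.2 ++ [pvCell main t x])
  else (l, st.2.1, fin1, st.2.2.2)

def find (start : Int) (end_ : Int) (main : List (List Int)) : (List (Int × Int)) × List Int :=
  let t := end_
  let t1 := start
  let s1 := (PySem.List.pyRange 0 (t + 1) 1).foldl (pvStep1 main t1) ([], [], [], [])
  let s2 := (PySem.List.pyRange (t1 + 1) (t + 1) 1).foldl (pvStep2 main t) s1
  (s2.1 ++ s2.2.1.reverse, s2.2.2.1 ++ s2.2.2.2.reverse)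

-- ===== PORT B =====
def find_alt (start : Int) (end_ : Int) (main : List (List Int)) : (List (Int × Int)) × List Int :=
  if start > end_ then ([], [])
  else
    let coords :=
      (PySem.List.pyRange start (end_ + 1) 1).map (fun x => (start, x))
      ++ (PySem.List.pyRange (start + 1) (end_ + 1) 1).map (fun x => (x, end_))
      ++ (PySem.List.pyRange (end_ - 1) start (-1)).map (fun x => (end_, x))
      ++ (PySem.List.pyRange end_ start (-1)).map (fun x => (x, start))
    (coords, coords.map (fun ij => pvCell main ij.1 ij.2))

-- ===== PRECONDITION & SPEC =====
-- Pre_ excludes (a) inputs where Python A raises IndexError (perimeter cell out of range) and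
-- (b) negative start with start ≤ end_, where A returns values read by negative-index wraparound —
-- outside the natural domain of a matrix-boundary walk.
def Pre_find (start : Int) (end_ : Int) (main : List (List Int)) : Prop :=
  end_ < start ∨
    (0 ≤ start ∧ end_ < (main.length : Int) ∧
      ∀ x ∈ PySem.List.pyRange start (end_ + 1) 1,
        end_ < ((PySem.List.pyGetD main x []).length : Int))
instance (start : Int) (end_ : Int) (main : List (List Int)) : Decidable (Pre_find start end_ main) := by unfold Pre_find; infer_instance
def pvWitness_find : Int × Int × List (List Int) := (0, 1, [[1, 2], [3, 4]])
def Spec_find (start : Int) (end_ : Int) (main : List (List Int)) (out : (List (Int × Int)) × List Int) : Prop := out = find_alt start end_ main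
instance (start : Int) (end_ : Int) (main : List (List Int)) (out : (List (Int × Int)) × List Int) : Decidable (Spec_find start end_ main out) := by unfold Spec_find; infer_instance

-- ===== CLAIM (what is proved, stated in full; the proofs are below) =====
def Claim_equal_find : Prop := ∀ (start : Int) (end_ : Int) (main : List (List Int)), Dom_find start end_ main → Pre_find start end_ main → Spec_find start end_ main (find start end_ main)

-- ===== LEMMAS AND PROOFS =====

lemma pvStep1_char (main : List (List Int)) (t1 : Int) (xs : List Int)
    (a b : List (Int × Int)) (c d : List Int) :
    xs.foldl (pvStep1 main t1) (a, b, c, d) =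
      (a ++ (xs.filter (fun x => decide (t1 ≤ x))).map (fun x => (t1, x)),
       b ++ (xs.filter (fun x => decide (t1 < x))).map (fun x => (x, t1)),
       c ++ (xs.filter (fun x => decide (t1 ≤ x))).map (fun x => pvCell main t1 x),
       d ++ (xs.filter (fun x => decide (t1 < x))).map (fun x => pvCell main x t1)) := by
  induction xs generalizing a b c d with
  | nil => simp
  | cons x xs ih =>
    simp only [List.foldl_cons, List.filter_cons]
    by_cases h : x < t1
    · have h1 : ¬ t1 ≤ x := by omega
      have h2 : ¬ t1 < x := by omega
      simp [pvStep1, h, h1, h2, ih]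
    · by_cases h2 : x = t1
      · subst h2
        have h1 : x ≤ x := le_refl x
        have h3 : ¬ x < x := lt_irrefl x
        simp [pvStep1, ih]
      · have h1 : t1 ≤ x := by omega
        have h3 : t1 < x := by omega
        simp [pvStep1, h, h1, h2, h3, ih]

lemma pvStep2_char (main : List (List Int)) (t : Int) (xs : List Int)
    (a b : List (Int × Int)) (c d : List Int) :
    xs.foldl (pvStep2 main t) (a, b, c, d) =
      (a ++ xs.map (fun x => (x, t)),
       b ++ (xs.filter (fun x => decide (x ≠ t))).map (fun x => (t, x)),
       c ++ xs.map (fun x => pvCell main x t),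
       d ++ (xs.filter (fun x => decide (x ≠ t))).map (fun x => pvCell main t x)) := by
  induction xs generalizing a b c d with
  | nil => simp
  | cons x xs ih =>
    simp only [List.foldl_cons, List.filter_cons]
    by_cases h : x = t
    · subst h; simp [pvStep2, ih]
    · simp [pvStep2, h, ih]

-- ===== VERDICT (by name: the statement is the Claim_ definition above) =====
theorem find_spec : Claim_equal_find := by
  intro start end_ main _ hpre
  unfold Spec_find find find_alt
  by_cases hgt : start > end_
  · -- start > end_: both return ([], [])
    simp only [if_pos hgt]
    rw [pvStep1_char, pvStep2_char]
    have hnil2 : PySem.List.pyRange (start + 1) (end_ + 1) 1 = [] :=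
      PySem.List.pyRange_one_eq_nil (by omega)
    have hf1 : (PySem.List.pyRange 0 (end_ + 1) 1).filter (fun x => decide (start ≤ x)) = [] := by
      rw [List.filter_eq_nil_iff]
      intro x hx
      have := (PySem.List.mem_pyRange_one).1 hx
      simp; omega
    have hf2 : (PySem.List.pyRange 0 (end_ + 1) 1).filter (fun x => decide (start < x)) = [] := by
      rw [List.filter_eq_nil_iff]
      intro x hx
      have := (PySem.List.mem_pyRange_one).1 hx
      simp; omega
    simp [hnil2, hf1, hf2]
  · -- 0 ≤ start ≤ end_
    have hs : 0 ≤ start := by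
      rcases hpre with h | ⟨hs, _, _⟩
      · omega
      · exact hs
    have hse : start ≤ end_ := by omega
    simp only [if_neg hgt]
    rw [pvStep1_char, pvStep2_char]
    -- first loop range splits at start
    have hsplit : PySem.List.pyRange 0 (end_ + 1) 1 =
        PySem.List.pyRange 0 start 1 ++ PySem.List.pyRange start (end_ + 1) 1 :=
      PySem.List.pyRange_one_append 0 start (end_ + 1) hs (by omega)
    have hlow_le : (PySem.List.pyRange 0 start 1).filter (fun x => decide (start ≤ x)) = [] := by
      rw [List.filter_eq_nil_iff]; intro x hx
      have := (PySem.List.mem_pyRange_one).1 hx; simp; omega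
    have hlow_lt : (PySem.List.pyRange 0 start 1).filter (fun x => decide (start < x)) = [] := by
      rw [List.filter_eq_nil_iff]; intro x hx
      have := (PySem.List.mem_pyRange_one).1 hx; simp; omega
    have hhi_le : (PySem.List.pyRange start (end_ + 1) 1).filter (fun x => decide (start ≤ x)) =
        PySem.List.pyRange start (end_ + 1) 1 := by
      rw [List.filter_eq_self]; intro x hx
      have := (PySem.List.mem_pyRange_one).1 hx; simp; omega
    have hcons : PySem.List.pyRange start (end_ + 1) 1 =
        start :: PySem.List.pyRange (start + 1) (end_ + 1) 1 :=
      PySem.List.pyRange_one_cons (by omega)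
    have hhi_lt : (PySem.List.pyRange start (end_ + 1) 1).filter (fun x => decide (start < x)) =
        PySem.List.pyRange (start + 1) (end_ + 1) 1 := by
      rw [hcons, List.filter_cons]
      rw [if_neg (by simp)]
      rw [List.filter_eq_self]
      intro x hx
      have := (PySem.List.mem_pyRange_one).1 hx; simp; omega
    -- second loop: drop the last element end_ from the ≠-filtered range
    have hfilter2 : (PySem.List.pyRange (start + 1) (end_ + 1) 1).filter (fun x => decide (x ≠ end_)) =
        PySem.List.pyRange (start + 1) end_ 1 := by
      by_cases hst : start + 1 ≤ end_
      · rw [PySem.List.pyRange_one_succ_right hst, List.filter_append]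
        simp
        omega
      · have heq : end_ = start := by omega
        subst heq
        rw [PySem.List.pyRange_one_eq_nil (by omega), PySem.List.pyRange_one_eq_nil (by omega)]
        simp
    -- relate B's countdown ranges to reversed count-up ranges
    have hrev_bottom : PySem.List.pyRange (end_ - 1) start (-1) =
        (PySem.List.pyRange (start + 1) end_ 1).reverse := by
      have he : end_ - 1 + 1 = end_ := by omega
      rw [PySem.List.pyRange_neg_one_eq_reverse (end_ - 1) start, he]
    have hrev_left : PySem.List.pyRange end_ start (-1) =
        (PySem.List.pyRange (start + 1) (end_ + 1) 1).reverse :=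
      PySem.List.pyRange_neg_one_eq_reverse end_ start
    rw [hsplit]
    simp only [List.filter_append, hlow_le, hlow_lt, hhi_le, hhi_lt, hfilter2,
      hrev_bottom, hrev_left, List.nil_append, List.map_append,
      List.map_reverse, List.map_map, List.reverse_append]
    simp [Function.comp_def, List.append_assoc]
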